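-- pv_equiv track=rewrite | github.com/twbeatles/navernews-tabsearch | core/query_parser.py | build_fetch_key
-- ===== SOURCE A (Python) =====
-- from typing import List, Tuple
--
-- def build_fetch_key(search_keyword: str, exclude_words: List[str]) -> str:
--     normalized_keyword = (search_keyword or "").strip().lower()
--     normalized_excludes = sorted(
--         {
--             word.strip().lower()
--             for word in (exclude_words or [])
--             if isinstance(word, str) and word.strip()
--         }
--     )
--     return f"{normalized_keyword}|{'|'.join(normalized_excludes)}"
-- ===== SOURCE B (Python) =====
-- from typing import List
--
-- def build_fetch_key(search_keyword: str, exclude_words: List[str]) -> str: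
--     normalized_keyword = (search_keyword or "").strip().lower()
--     uniq = []  # kept strictly increasing at all times
--     for word in (exclude_words or []):
--         if isinstance(word, str):
--             w = word.strip().lower()
--             if w:
--                 i = 0
--                 n = len(uniq)
--                 while i < n and uniq[i] < w:
--                     i += 1
--                 if i == n or uniq[i] != w:
--                     uniq.insert(i, w)
--     return f"{normalized_keyword}|{'|'.join(uniq)}"
-- ===== Notes on version B (the rewrite author's own statement) =====
-- stated objective: alternative
-- what changed: Replaces A's build-a-set-then-sort pipeline with a single pass that maintains a strictly increasing list via in-order insertion (a linear position scan plus list.insert), so no set and no sort call exist; deduplication and ordering happen incrementally at insertion time.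
import Mathlib
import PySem

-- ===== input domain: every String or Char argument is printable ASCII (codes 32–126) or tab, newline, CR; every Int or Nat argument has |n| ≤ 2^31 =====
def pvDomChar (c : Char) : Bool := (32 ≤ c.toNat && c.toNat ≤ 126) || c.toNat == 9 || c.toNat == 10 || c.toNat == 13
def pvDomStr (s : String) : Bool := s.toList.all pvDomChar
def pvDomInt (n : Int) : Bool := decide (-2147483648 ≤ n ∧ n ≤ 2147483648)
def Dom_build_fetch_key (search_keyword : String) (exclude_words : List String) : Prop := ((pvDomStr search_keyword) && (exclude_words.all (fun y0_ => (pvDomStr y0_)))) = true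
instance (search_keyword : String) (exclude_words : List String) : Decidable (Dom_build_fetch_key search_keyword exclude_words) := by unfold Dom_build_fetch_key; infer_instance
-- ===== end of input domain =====

-- B replaces A's build-a-set-then-sort pipeline with a single pass maintaining a strictly
-- increasing list by in-order insertion (position scan + list.insert); no set, no sort call.

-- ===== PORT A =====
def build_fetch_key (search_keyword : String) (exclude_words : List String) : String :=
  let normalized_keyword :=
    PySem.Str.lower (PySem.Str.strip (if search_keyword = "" then "" else search_keyword))
  -- set comprehension {word.strip().lower() for word in exclude_words if word.strip()}; sorted()
  let normalized_excludes :=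
    PySem.List.sorted
      (PySem.Set.ofList
        ((exclude_words.filter (fun word => !(PySem.Str.strip word = ""))).map
          (fun word => PySem.Str.lower (PySem.Str.strip word))))
      (fun x => x) false
  normalized_keyword ++ "|" ++ PySem.Str.join "|" normalized_excludes

-- ===== PORT B =====
-- the 'while i < n and uniq[i] < w: i += 1' scan for the insertion position
def pvScan (uniq : List String) (w : String) (i : Nat) : Nat :=
  if h : i < uniq.length then
    if uniq[i] < w then pvScan uniq w (i + 1) else i
  else i
termination_by uniq.length - i

def build_fetch_key_alt (search_keyword : String) (exclude_words : List String) : String :=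
  let normalized_keyword :=
    PySem.Str.lower (PySem.Str.strip (if search_keyword = "" then "" else search_keyword))
  -- the single for-loop: skip words with empty strip, scan for the position, insert unless present
  let uniq :=
    exclude_words.foldl
      (fun uniq word =>
        if PySem.Str.strip word = "" then uniq
        else
          let w := PySem.Str.lower (PySem.Str.strip word)
          let i := pvScan uniq w 0
          if i = uniq.length ∨ uniq[i]? ≠ some w then PySem.List.insert uniq (i : Int) w
          else uniq)
      []
  normalized_keyword ++ "|" ++ PySem.Str.join "|" uniq

-- ===== PRECONDITION & SPEC =====
def Spec_build_fetch_key (search_keyword : String) (exclude_words : List String) (out : String) : Prop := out = build_fetch_key_alt search_keyword exclude_words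
instance (search_keyword : String) (exclude_words : List String) (out : String) : Decidable (Spec_build_fetch_key search_keyword exclude_words out) := by unfold Spec_build_fetch_key; infer_instance

-- ===== CLAIM =====
def Claim_equal_build_fetch_key : Prop := ∀ (search_keyword : String) (exclude_words : List String), Dom_build_fetch_key search_keyword exclude_words → Spec_build_fetch_key search_keyword exclude_words (build_fetch_key search_keyword exclude_words)

-- ===== LEMMAS AND PROOFS =====

-- structural reference form of one insertion step
def pvInsertUnique (acc : List String) (w : String) : List String :=
  match acc with
  | [] => [w]
  | head :: rest =>
    if w < head then w :: head :: rest
    else if w = head then head :: rest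
    else head :: pvInsertUnique rest w

theorem pvScan_le (l : List String) (w : String) : ∀ (k i : Nat), l.length - i ≤ k →
    i ≤ l.length → pvScan l w i ≤ l.length := by
  intro k
  induction k with
  | zero =>
    intro i h hi
    have : ¬ i < l.length := by omega
    rw [pvScan, dif_neg this]; omega
  | succ k ih =>
    intro i h hi
    by_cases hlt : i < l.length
    · rw [pvScan, dif_pos hlt]
      by_cases hw : l[i]'hlt < w
      · rw [if_pos hw]; exact ih (i + 1) (by omega) (by omega)
      · rw [if_neg hw]; omega
    · rw [pvScan, dif_neg hlt]; omega

theorem pvScan_shift (a w : String) (rest : List String) : ∀ (k i : Nat), rest.length - i ≤ k →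
    pvScan (a :: rest) w (i + 1) = pvScan rest w i + 1 := by
  intro k
  induction k with
  | zero =>
    intro i h
    have h1 : ¬ i < rest.length := by omega
    have h2 : ¬ i + 1 < (a :: rest).length := by simp; omega
    rw [pvScan, dif_neg h2, pvScan, dif_neg h1]
  | succ k ih =>
    intro i h
    by_cases hlt : i < rest.length
    · have hlt2 : i + 1 < (a :: rest).length := by simp; omega
      conv_lhs => rw [pvScan]
      conv_rhs => rw [pvScan]
      rw [dif_pos hlt2, dif_pos hlt]
      have hget : (a :: rest)[i + 1]'hlt2 = rest[i]'hlt := by simp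
      rw [hget]
      by_cases hw : rest[i]'hlt < w
      · rw [if_pos hw, if_pos hw]; exact ih (i + 1) (by omega)
      · rw [if_neg hw, if_neg hw]
    · have h2 : ¬ i + 1 < (a :: rest).length := by simp; omega
      rw [pvScan, dif_neg h2, pvScan, dif_neg hlt]

-- one B-loop step (scan + conditional insert) equals the structural insertion
theorem pvStep_eq (w : String) : ∀ (uniq : List String),
    (if pvScan uniq w 0 = uniq.length ∨ uniq[pvScan uniq w 0]? ≠ some w
     then PySem.List.insert uniq ((pvScan uniq w 0 : Nat) : Int) w
     else uniq) = pvInsertUnique uniq w := by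
  intro uniq
  induction uniq with
  | nil =>
    have h0 : pvScan [] w 0 = 0 := by rw [pvScan]; simp
    simp [h0, pvInsertUnique, PySem.List.insert_zero]
  | cons a rest ih =>
    have hlen : 0 < (a :: rest).length := by simp
    by_cases hw : a < w
    · -- scan moves past the head
      have hs : pvScan (a :: rest) w 0 = pvScan rest w 0 + 1 := by
        rw [pvScan, dif_pos hlen]
        have : (a :: rest)[0]'hlen = a := by simp
        rw [this, if_pos hw]
        exact pvScan_shift a w rest rest.length 0 (by omega)
      have hj : pvScan rest w 0 ≤ rest.length :=
        pvScan_le rest w rest.length 0 (by omega) (by omega)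
      have hcond : (pvScan (a :: rest) w 0 = (a :: rest).length ∨
            (a :: rest)[pvScan (a :: rest) w 0]? ≠ some w)
          ↔ (pvScan rest w 0 = rest.length ∨ rest[pvScan rest w 0]? ≠ some w) := by
        rw [hs]; simp
      have hins : PySem.List.insert (a :: rest) ((pvScan rest w 0 + 1 : Nat) : Int) w
          = a :: PySem.List.insert rest ((pvScan rest w 0 : Nat) : Int) w := by
        rw [PySem.List.insert_natCast _ _ _ (by simp; omega),
            PySem.List.insert_natCast _ _ _ hj]
        simp [List.take_succ_cons, List.drop_succ_cons]
      have hnw : ¬ w < a := by exact not_lt.mpr (le_of_lt hw)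
      have hne : ¬ w = a := fun h => by subst h; exact lt_irrefl _ hw
      rw [pvInsertUnique, if_neg hnw, if_neg hne, ← ih]
      by_cases hc : pvScan rest w 0 = rest.length ∨ rest[pvScan rest w 0]? ≠ some w
      · rw [if_pos (hcond.mpr hc), if_pos hc, hs, hins]
      · rw [if_neg (fun h => hc (hcond.mp h)), if_neg hc]
    · -- scan stops at the head
      have hs : pvScan (a :: rest) w 0 = 0 := by
        rw [pvScan, dif_pos hlen]
        have : (a :: rest)[0]'hlen = a := by simp
        rw [this, if_neg hw]
      by_cases heq : w = a
      · subst heq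
        have hcond : ¬ (pvScan (w :: rest) w 0 = (w :: rest).length ∨
            (w :: rest)[pvScan (w :: rest) w 0]? ≠ some w) := by
          rw [hs]; simp
        rw [if_neg hcond, pvInsertUnique, if_neg hw, if_pos rfl]
      · have hlt : w < a := lt_of_le_of_ne (not_lt.mp hw) heq
        have hcond : pvScan (a :: rest) w 0 = (a :: rest).length ∨
            (a :: rest)[pvScan (a :: rest) w 0]? ≠ some w := by
          rw [hs]; right; simp; exact fun h => heq h.symm
        rw [if_pos hcond, hs, pvInsertUnique, if_pos hlt]
        have : ((0 : Nat) : Int) = (0 : Int) := by norm_num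
        rw [this, PySem.List.insert_zero]

-- B's fold equals the fold of the structural insertion step
theorem foldB_eq (ex : List String) : ∀ (acc : List String),
    ex.foldl
        (fun uniq word =>
          if PySem.Str.strip word = "" then uniq
          else
            let w := PySem.Str.lower (PySem.Str.strip word)
            let i := pvScan uniq w 0
            if i = uniq.length ∨ uniq[i]? ≠ some w then PySem.List.insert uniq (i : Int) w
            else uniq)
        acc
      = ex.foldl
          (fun uniq word =>
            if PySem.Str.strip word = "" then uniq
            else pvInsertUnique uniq (PySem.Str.lower (PySem.Str.strip word)))
          acc := by
  induction ex with
  | nil => intro acc; rfl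
  | cons word ws ih =>
    intro acc
    by_cases h : PySem.Str.strip word = ""
    · simp only [List.foldl_cons, if_pos h]; exact ih acc
    · simp only [List.foldl_cons, if_neg h]
      rw [pvStep_eq (PySem.Str.lower (PySem.Str.strip word)) acc]
      exact ih _

theorem mem_pvInsertUnique (acc : List String) (w x : String) :
    x ∈ pvInsertUnique acc w ↔ x ∈ acc ∨ x = w := by
  induction acc with
  | nil => simp [pvInsertUnique]
  | cons a rest ih =>
    by_cases h1 : w < a
    · simp [pvInsertUnique, h1]; tauto
    · by_cases h2 : w = a
      · subst h2; simp [pvInsertUnique]; tauto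
      · simp [pvInsertUnique, h1, h2, ih]; tauto

theorem pairwise_pvInsertUnique (acc : List String) (w : String)
    (h : acc.Pairwise (· < ·)) : (pvInsertUnique acc w).Pairwise (· < ·) := by
  induction acc with
  | nil => simp [pvInsertUnique]
  | cons a rest ih =>
    have ha : ∀ y ∈ rest, a < y := (List.pairwise_cons.mp h).1
    have hr : rest.Pairwise (· < ·) := (List.pairwise_cons.mp h).2
    by_cases h1 : w < a
    · rw [show pvInsertUnique (a :: rest) w = w :: a :: rest by simp [pvInsertUnique, h1]]
      refine List.pairwise_cons.mpr ⟨?_, h⟩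
      intro y hy
      rcases List.mem_cons.mp hy with rfl | hy
      · exact h1
      · exact lt_trans h1 (ha y hy)
    · by_cases h2 : w = a
      · subst h2; simpa [pvInsertUnique, h1] using h
      · have haw : a < w := lt_of_le_of_ne (not_lt.mp h1) (Ne.symm h2)
        rw [show pvInsertUnique (a :: rest) w = a :: pvInsertUnique rest w by
          simp [pvInsertUnique, h1, h2]]
        refine List.pairwise_cons.mpr ⟨?_, ih hr⟩
        intro y hy
        rcases (mem_pvInsertUnique rest w y).mp hy with hy | rfl
        · exact ha y hy
        · exact haw

-- the pvInsertUnique fold over exclude_words equals folding over the normalized word list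
theorem foldl_filter_map (exclude_words : List String) : ∀ (acc : List String),
    exclude_words.foldl
        (fun acc word =>
          if PySem.Str.strip word = "" then acc
          else pvInsertUnique acc (PySem.Str.lower (PySem.Str.strip word)))
        acc
      = ((exclude_words.filter (fun word => !(PySem.Str.strip word = ""))).map
          (fun word => PySem.Str.lower (PySem.Str.strip word))).foldl pvInsertUnique acc := by
  induction exclude_words with
  | nil => intro acc; simp
  | cons w ws ih =>
    intro acc
    by_cases h : PySem.Str.strip w = ""
    · simp [h, ih]
    · simp [h, ih]

theorem foldl_pvInsertUnique_spec (ws : List String) : ∀ (acc : List String),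
    acc.Pairwise (· < ·) →
    (ws.foldl pvInsertUnique acc).Pairwise (· < ·) ∧
      (∀ x, x ∈ ws.foldl pvInsertUnique acc ↔ x ∈ acc ∨ x ∈ ws) := by
  induction ws with
  | nil => intro acc h; simpa using h
  | cons w ws ih =>
    intro acc h
    have h' : (pvInsertUnique acc w).Pairwise (· < ·) := pairwise_pvInsertUnique acc w h
    have := ih (pvInsertUnique acc w) h'
    refine ⟨this.1, fun x => ?_⟩
    rw [List.foldl_cons, (this.2 x), mem_pvInsertUnique]
    simp; tauto

theorem foldl_eq_sorted_set (ws : List String) :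
    ws.foldl pvInsertUnique [] =
      PySem.List.sorted (PySem.Set.ofList ws) (fun x => x) false := by
  have hspec := foldl_pvInsertUnique_spec ws [] (by simp)
  symm
  apply PySem.List.sorted_eq_of_perm_of_pairwise_lt
  · have hnd1 : (ws.foldl pvInsertUnique []).Nodup := hspec.1.nodup
    have hnd2 : (PySem.Set.ofList ws).Nodup := PySem.Set.nodup_ofList ws
    refine (List.perm_ext_iff_of_nodup hnd1 hnd2).mpr ?_
    intro x
    rw [hspec.2 x]
    simp [PySem.Set.mem_ofList]
  · exact hspec.1

-- ===== VERDICT =====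
theorem build_fetch_key_spec : Claim_equal_build_fetch_key := by
  intro sk ex _
  unfold Spec_build_fetch_key build_fetch_key build_fetch_key_alt
  rw [foldB_eq, foldl_filter_map, foldl_eq_sorted_set]
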